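-- pv_equiv track=rewrite | github.com/dfwlab/cyclicpepedia | Tools/peptide_properties.py | create_one_character_peptide
-- ===== SOURCE A (Python) =====
-- AminoAcids = [('A', 'ALA', 'C[C@H](N)C=O', 'Alanine'),
--               ('C', 'CYS', 'N[C@H](C=O)CS', 'Cysteine'),
--               ('D', 'ASP', 'N[C@H](C=O)CC(=O)O', 'Aspartic acid'),
--               ('E', 'GLU', 'N[C@H](C=O)CCC(=O)O', 'Glutamic acid'),
--               ('F', 'PHE', 'N[C@H](C=O)Cc1ccccc1', 'Phenylalanine'),
--               ('G', 'GLY', 'NCC=O', 'Glycine'),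
--               ('H', 'HIS', 'N[C@H](C=O)Cc1c[nH]cn1', 'Histidine'),
--               ('I', 'ILE', 'CC[C@H](C)[C@H](N)C=O', 'Isoleucine'),
--               ('K', 'LYS', 'NCCCC[C@H](N)C=O', 'Lysine'),
--               ('L', 'LEU', 'CC(C)C[C@H](N)C=O', 'Leucine'),
--               ('M', 'MET', 'CSCC[C@H](N)C=O', 'Methionine'),
--               ('N', 'ASN', 'NC(=O)C[C@H](N)C=O', 'Asparagine'),
--               ('P', 'PRO', 'O=C[C@@H]1CCCN1', 'Proline'),
--               ('Q', 'GLN', 'NC(=O)CC[C@H](N)C=O', 'Glutamine'),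
--               ('R', 'ARG', 'N=C(N)NCCC[C@H](N)C=O', 'Arginine'),
--               ('S', 'SER', 'N[C@H](C=O)CO', 'Serine'),
--               ('T', 'THR', 'C[C@@H](O)[C@H](N)C=O', 'Threonine'),
--               ('V', 'VAL', 'CC(C)[C@H](N)C=O', 'Valine'),
--               ('W', 'TRP', 'N[C@H](C=O)Cc1c[nH]c2ccccc12', 'Tryptophan'),
--               ('Y', 'TYR', 'N[C@H](C=O)Cc1ccc(O)cc1', 'Tyrosine'),
--               ('O', 'PYL', '', 'Pyrrolysine'), # 非必需
--               ('U', 'SEC', '', 'Selenocysteine'), # 非必需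
--               ('B', 'ASX', '', 'Aspartic acid or Asparagine'), # 必需组合
--               ('Z', 'GLX', '', 'Glutamic acid or Glutamine'), # 必需组合
--              ]
--
-- def create_one_character_peptide(nodes): # 忽略侧链互作
--     amino_acid_refs = {i:j for j, i, _, _ in AminoAcids}
--     amino_acid_refs['UNK'] = 'X'
--     tail = ''
--     if '(NH2)' == nodes[-1].upper()[-5:]:
--         nodes[-1] = nodes[-1][:-5]
--         tail = '(NH2)'
--     is_essential_aa = [i.upper().strip() in amino_acid_refs.keys() for i in nodes]
--     if False in is_essential_aa:
--         return None
--     else: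
--         return ''.join([amino_acid_refs[i.upper().strip()] for i in nodes])+tail
-- ===== SOURCE B (Python) =====
-- AA3_TO_1 = {'ALA': 'A', 'CYS': 'C', 'ASP': 'D', 'GLU': 'E', 'PHE': 'F',
--             'GLY': 'G', 'HIS': 'H', 'ILE': 'I', 'LYS': 'K', 'LEU': 'L',
--             'MET': 'M', 'ASN': 'N', 'PRO': 'P', 'GLN': 'Q', 'ARG': 'R',
--             'SER': 'S', 'THR': 'T', 'VAL': 'V', 'TRP': 'W', 'TYR': 'Y',
--             'PYL': 'O', 'SEC': 'U', 'ASX': 'B', 'GLX': 'Z', 'UNK': 'X'}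
--
-- def create_one_character_peptide(nodes):
--     # Like the original, mutates nodes[-1] in place when it ends with '(NH2)'.
--     tail = ''
--     if nodes[-1].upper().endswith('(NH2)'):
--         nodes[-1] = nodes[-1][:-5]
--         tail = '(NH2)'
--     out = []
--     for name in nodes:
--         letter = AA3_TO_1.get(name.upper().strip())
--         if letter is None:
--             return None
--         out.append(letter)
--     return ''.join(out) + tail
-- ===== Notes on version B (the rewrite author's own statement) =====
-- stated objective: simpler
-- what changed: Replaces the two-pass scheme (build a boolean validity list, test 'False in' it, then re-map every node through the dict again) with a single fused pass over a literal lookup table that returns None as soon as an unknown residue is seen and otherwise accumulates the letters.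
import Mathlib
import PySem

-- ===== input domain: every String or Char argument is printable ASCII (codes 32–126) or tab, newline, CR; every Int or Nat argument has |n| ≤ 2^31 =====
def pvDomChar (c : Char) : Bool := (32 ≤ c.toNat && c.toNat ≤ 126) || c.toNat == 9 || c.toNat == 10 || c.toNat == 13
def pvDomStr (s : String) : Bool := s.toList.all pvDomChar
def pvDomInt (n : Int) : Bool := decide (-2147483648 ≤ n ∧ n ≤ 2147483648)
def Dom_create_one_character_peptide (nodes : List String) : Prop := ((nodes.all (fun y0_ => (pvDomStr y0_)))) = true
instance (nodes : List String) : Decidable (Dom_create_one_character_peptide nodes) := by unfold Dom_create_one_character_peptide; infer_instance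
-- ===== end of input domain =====

-- B fuses A's two passes (validity list + re-map) into one early-returning lookup pass;
-- both versions mutate nodes[-1] in place in Python (the Lean ports model the list value after that mutation);
-- equivalence is about the return value.

-- ===== PORT A =====
def pvAminoAcids : List (String × String × String × String) :=
  [("A","ALA","C[C@H](N)C=O","Alanine"),
   ("C","CYS","N[C@H](C=O)CS","Cysteine"),
   ("D","ASP","N[C@H](C=O)CC(=O)O","Aspartic acid"),
   ("E","GLU","N[C@H](C=O)CCC(=O)O","Glutamic acid"),
   ("F","PHE","N[C@H](C=O)Cc1ccccc1","Phenylalanine"),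
   ("G","GLY","NCC=O","Glycine"),
   ("H","HIS","N[C@H](C=O)Cc1c[nH]cn1","Histidine"),
   ("I","ILE","CC[C@H](C)[C@H](N)C=O","Isoleucine"),
   ("K","LYS","NCCCC[C@H](N)C=O","Lysine"),
   ("L","LEU","CC(C)C[C@H](N)C=O","Leucine"),
   ("M","MET","CSCC[C@H](N)C=O","Methionine"),
   ("N","ASN","NC(=O)C[C@H](N)C=O","Asparagine"),
   ("P","PRO","O=C[C@@H]1CCCN1","Proline"),
   ("Q","GLN","NC(=O)CC[C@H](N)C=O","Glutamine"),
   ("R","ARG","N=C(N)NCCC[C@H](N)C=O","Arginine"),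
   ("S","SER","N[C@H](C=O)CO","Serine"),
   ("T","THR","C[C@@H](O)[C@H](N)C=O","Threonine"),
   ("V","VAL","CC(C)[C@H](N)C=O","Valine"),
   ("W","TRP","N[C@H](C=O)Cc1c[nH]c2ccccc12","Tryptophan"),
   ("Y","TYR","N[C@H](C=O)Cc1ccc(O)cc1","Tyrosine"),
   ("O","PYL","","Pyrrolysine"),
   ("U","SEC","","Selenocysteine"),
   ("B","ASX","","Aspartic acid or Asparagine"),
   ("Z","GLX","","Glutamic acid or Glutamine")]

-- {i:j for j, i, _, _ in AminoAcids} as a fold of inserts, then the 'UNK' insert.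
def pvRefsA : PySem.Dict String String :=
  (pvAminoAcids.foldl (fun d p => d.insert p.2.1 p.1) PySem.Dict.empty).insert "UNK" "X"

def create_one_character_peptide (nodes : List String) : Option String :=
  match PySem.List.pyGet? nodes (-1) with
  | none => none   -- IndexError on empty list; excluded by Pre_
  | some last =>
    -- '(NH2)' == nodes[-1].upper()[-5:]  and the in-place mutation nodes[-1] = nodes[-1][:-5]
    let cond := PySem.Str.slice (PySem.Str.upper last) (some (-5)) none = "(NH2)"
    let nodes' := if cond then nodes.dropLast ++ [PySem.Str.slice last none (some (-5))] else nodes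
    let tail := if cond then "(NH2)" else ""
    let is_essential_aa := nodes'.map (fun i => pvRefsA.contains (PySem.Str.strip (PySem.Str.upper i)))
    if is_essential_aa.contains false then none
    else some (PySem.Str.join ""
      (nodes'.map (fun i => (pvRefsA.get? (PySem.Str.strip (PySem.Str.upper i))).getD "")) ++ tail)

-- ===== PORT B =====
def pvAA3TO1 : PySem.Dict String String :=
  PySem.Dict.ofList
    [("ALA","A"),("CYS","C"),("ASP","D"),("GLU","E"),("PHE","F"),
     ("GLY","G"),("HIS","H"),("ILE","I"),("LYS","K"),("LEU","L"),
     ("MET","M"),("ASN","N"),("PRO","P"),("GLN","Q"),("ARG","R"),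
     ("SER","S"),("THR","T"),("VAL","V"),("TRP","W"),("TYR","Y"),
     ("PYL","O"),("SEC","U"),("ASX","B"),("GLX","Z"),("UNK","X")]

-- Source B's loop with early return: none on the first unknown residue, else the letters in order.
def pvLoopB : List String → Option (List String)
  | [] => some []
  | name :: rest =>
    match pvAA3TO1.get? (PySem.Str.strip (PySem.Str.upper name)) with
    | none => none
    | some letter => (pvLoopB rest).map (fun out => letter :: out)

def create_one_character_peptide_alt (nodes : List String) : Option String :=
  match PySem.List.pyGet? nodes (-1) with
  | none => none   -- IndexError on empty list; excluded by Pre_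
  | some last =>
    let strip5 := PySem.Str.endswith (PySem.Str.upper last) "(NH2)"
    let nodes' := if strip5 then nodes.dropLast ++ [PySem.Str.slice last none (some (-5))] else nodes
    let tail := if strip5 then "(NH2)" else ""
    (pvLoopB nodes').map (fun out => PySem.Str.join "" out ++ tail)

-- ===== PRECONDITION & SPEC =====
-- Pre_ excludes only the empty list, on which the Python A raises IndexError (nodes[-1]).
def Pre_create_one_character_peptide (nodes : List String) : Prop := nodes ≠ []
instance (nodes : List String) : Decidable (Pre_create_one_character_peptide nodes) := by
  unfold Pre_create_one_character_peptide; infer_instance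
def pvWitness_create_one_character_peptide : List String := ["ala", "Gly ", "CYS(NH2)"]

def Spec_create_one_character_peptide (nodes : List String) (out : Option String) : Prop :=
  out = create_one_character_peptide_alt nodes
instance (nodes : List String) (out : Option String) :
    Decidable (Spec_create_one_character_peptide nodes out) := by
  unfold Spec_create_one_character_peptide; infer_instance

-- ===== CLAIM (what is proved, stated in full; the proofs are below) =====
def Claim_equal_create_one_character_peptide : Prop :=
  ∀ (nodes : List String), Dom_create_one_character_peptide nodes →
    Pre_create_one_character_peptide nodes →
      Spec_create_one_character_peptide nodes (create_one_character_peptide nodes)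

-- ===== LEMMAS AND PROOFS =====

-- The two lookup tables are the same dict.
lemma pvRefsA_eq : pvRefsA = pvAA3TO1 := by decide

-- s[-5:] == '(NH2)'  ↔  s.endswith('(NH2)')  (a 5-character pattern).
lemma slice_eq_iff_endswith (s : String) :
    (PySem.Str.slice s (some (-5)) none = "(NH2)") ↔
      PySem.Str.endswith s "(NH2)" = true := by
  rw [PySem.Str.endswith_eq, PySem.Chars.endswith_iff]
  constructor
  · intro h
    have h' := congrArg String.toList h
    rw [PySem.Str.toList_slice, PySem.Chars.slice_eq_listSlice,
        PySem.List.slice_from_neg_ofNat _ 5 (by omega)] at h'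
    rw [show ("(NH2)" : String).toList = s.toList.drop (s.toList.length - 5) from h'.symm]
    exact List.drop_suffix _ _
  · intro h
    obtain ⟨t, ht⟩ := h
    apply String.toList_inj.mp
    rw [PySem.Str.toList_slice, PySem.Chars.slice_eq_listSlice,
        PySem.List.slice_from_neg_ofNat _ 5 (by omega)]
    have hlen : s.toList.length = t.length + 5 := by
      rw [← ht, List.length_append]; rfl
    rw [hlen, Nat.add_sub_cancel, ← ht, List.drop_left]

-- A's validity-then-remap pair of passes equals B's single early-return pass.
lemma loop_eq (ns : List String) :
    (if (ns.map (fun i => pvAA3TO1.contains (PySem.Str.strip (PySem.Str.upper i)))).contains false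
     then none
     else some (ns.map (fun i => (pvAA3TO1.get? (PySem.Str.strip (PySem.Str.upper i))).getD "")))
      = pvLoopB ns := by
  induction ns with
  | nil => simp [pvLoopB]
  | cons n t ih =>
    rw [List.map_cons, List.map_cons, List.contains_cons, pvLoopB]
    rw [PySem.Dict.contains_eq_isSome_get?]
    cases hg : pvAA3TO1.get? (PySem.Str.strip (PySem.Str.upper n)) with
    | none => rfl
    | some c =>
      cases hf : (List.map (fun i => pvAA3TO1.contains (PySem.Str.strip (PySem.Str.upper i))) t).contains false with
      | true =>
        rw [if_pos hf] at ih
        rw [← ih]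
        rfl
      | false =>
        rw [if_neg (by rw [hf]; exact Bool.false_ne_true)] at ih
        rw [← ih]
        rfl

-- Finishing step: the shared tail is appended after either loop shape.
lemma finish_eq (ns : List String) (tail : String) :
    (if (ns.map (fun i => pvAA3TO1.contains (PySem.Str.strip (PySem.Str.upper i)))).contains false
     then none
     else some (PySem.Str.join ""
       (ns.map (fun i => (pvAA3TO1.get? (PySem.Str.strip (PySem.Str.upper i))).getD "")) ++ tail))
      = (pvLoopB ns).map (fun out => PySem.Str.join "" out ++ tail) := by
  rw [← loop_eq ns]
  by_cases hf : (ns.map (fun i => pvAA3TO1.contains (PySem.Str.strip (PySem.Str.upper i)))).contains false = true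
  · rw [if_pos hf, if_pos hf]
    rfl
  · rw [if_neg hf, if_neg hf]
    rfl

-- ===== VERDICT (by name: the statement is the Claim_ definition above) =====
theorem create_one_character_peptide_spec : Claim_equal_create_one_character_peptide := by
  intro nodes _ _
  unfold Spec_create_one_character_peptide create_one_character_peptide create_one_character_peptide_alt
  cases hg : PySem.List.pyGet? nodes (-1) with
  | none => rfl
  | some last =>
    simp only [pvRefsA_eq]
    by_cases h : PySem.Str.slice (PySem.Str.upper last) (some (-5)) none = "(NH2)"
    · have he := (slice_eq_iff_endswith (PySem.Str.upper last)).mp h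
      rw [if_pos h, if_pos h, he, if_pos rfl, if_pos rfl]
      exact finish_eq _ _
    · have he : PySem.Str.endswith (PySem.Str.upper last) "(NH2)" = false := by
        cases hb : PySem.Str.endswith (PySem.Str.upper last) "(NH2)" with
        | false => rfl
        | true => exact absurd ((slice_eq_iff_endswith _).mpr hb) h
      rw [if_neg h, if_neg h, he]
      simp only [Bool.false_eq_true, if_false]
      exact finish_eq _ _
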